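-- pv_equiv track=rewrite | github.com/tinsukE/advent-of-code | 2023/18.py | calculate_volume
-- ===== SOURCE A (Python) =====
-- def calculate_volume(loop):
-- 	volume = 0
-- 	for row in loop:
-- 		inside = False
-- 		for item in row:
-- 			if item in ('|', 'L', 'J'):
-- 				inside = not inside
-- 			if item == '.' and inside or item != '.':
-- 				volume += 1
-- 	return volume
-- ===== SOURCE B (Python) =====
-- def calculate_volume(loop):
-- 	total = 0
-- 	for row in loop:
-- 		# split the row into the segments lying between toggle cells
-- 		segs = []
-- 		cur = []
-- 		for item in row:
-- 			if item in ('|', 'L', 'J'):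
-- 				segs.append(cur)
-- 				cur = []
-- 			else:
-- 				cur.append(item)
-- 		segs.append(cur)
-- 		# every non-'.' cell is boundary
-- 		for item in row:
-- 			if item != '.':
-- 				total += 1
-- 		# '.' cells in odd-numbered segments are interior
-- 		for k, seg in enumerate(segs):
-- 			if k % 2 == 1:
-- 				for item in seg:
-- 					if item == '.':
-- 						total += 1
-- 	return total
-- ===== Notes on version B (the rewrite author's own statement) =====
-- stated objective: alternative
-- what changed: Instead of a stateful inside/outside flag toggled cell-by-cell, B splits each row into the segments between toggle cells and counts boundary cells in one flat pass plus '.' cells in odd-numbered segments.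
import Mathlib
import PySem

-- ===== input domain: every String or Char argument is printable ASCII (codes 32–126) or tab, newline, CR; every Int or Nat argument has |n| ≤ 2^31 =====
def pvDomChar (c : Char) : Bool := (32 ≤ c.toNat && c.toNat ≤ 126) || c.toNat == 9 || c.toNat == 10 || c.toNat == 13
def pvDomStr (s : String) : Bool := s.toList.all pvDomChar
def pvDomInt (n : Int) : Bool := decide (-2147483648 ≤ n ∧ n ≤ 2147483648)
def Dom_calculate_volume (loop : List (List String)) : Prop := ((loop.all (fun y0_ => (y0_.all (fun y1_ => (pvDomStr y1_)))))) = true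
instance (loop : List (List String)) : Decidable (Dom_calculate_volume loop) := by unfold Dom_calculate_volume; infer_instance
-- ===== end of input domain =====

-- B replaces A's cell-by-cell inside/outside flag by splitting each row into segments
-- between toggle cells and counting '.' cells in odd-numbered segments (alternative decomposition).


-- ===== PORT A =====
def calculate_volume (loop : List (List String)) : Int :=
  loop.foldl (fun volume row =>
    (row.foldl (fun (st : Bool × Int) item =>
        let inside := if item == "|" || item == "L" || item == "J" then !st.1 else st.1
        (inside, if (item == "." && inside) || item != "." then st.2 + 1 else st.2))
      (false, volume)).2) 0

-- ===== PORT B =====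
def pvToggle (item : String) : Bool := item == "|" || item == "L" || item == "J"

def calculate_volume_alt (loop : List (List String)) : Int :=
  loop.foldl (fun total row =>
    let p := row.foldl (fun (st : List (List String) × List String) item =>
        if pvToggle item then (st.1 ++ [st.2], []) else (st.1, st.2 ++ [item]))
      ([], [])
    let segs := p.1 ++ [p.2]
    let total := row.foldl (fun t item => if item != "." then t + 1 else t) total
    (PySem.List.enumerate segs 0).foldl (fun t ks =>
      if PySem.Int.mod ks.1 2 == 1 then
        ks.2.foldl (fun t item => if item == "." then t + 1 else t) t
      else t) total) 0

-- ===== PRECONDITION & SPEC =====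
def Spec_calculate_volume (loop : List (List String)) (out : Int) : Prop := out = calculate_volume_alt loop
instance (loop : List (List String)) (out : Int) : Decidable (Spec_calculate_volume loop out) := by unfold Spec_calculate_volume; infer_instance

-- ===== CLAIM (what is proved, stated in full; the proofs are below) =====
def Claim_equal_calculate_volume : Prop := ∀ (loop : List (List String)), Dom_calculate_volume loop → Spec_calculate_volume loop (calculate_volume loop)

-- ===== LEMMAS AND PROOFS =====

/-- Segments of a row between toggle cells, recursively. -/
def pvSplit : List String → List (List String)
  | [] => [[]]
  | x :: xs =>
    if pvToggle x then [] :: pvSplit xs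
    else match pvSplit xs with
      | s :: r => (x :: s) :: r
      | [] => [[x]]

def pvDots (seg : List String) : Int :=
  seg.foldl (fun t item => if item == "." then t + 1 else t) 0

def pvNonDot (row : List String) : Int :=
  row.foldl (fun t item => if item != "." then t + 1 else t) 0

/-- Sum of the dots in the segments at positions of parity `b` (`b = true`: position 0 counts). -/
def pvDotsAt (b : Bool) : List (List String) → Int
  | [] => 0
  | s :: r => (if b then pvDots s else 0) + pvDotsAt (!b) r

theorem pvSplit_ne_nil (xs : List String) : pvSplit xs ≠ [] := by
  cases xs with
  | nil => simp [pvSplit]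
  | cons x xs =>
    simp only [pvSplit]
    split
    · simp
    · cases h : pvSplit xs <;> simp

theorem pvSplit_cons_exists (xs : List String) : ∃ s r, pvSplit xs = s :: r := by
  cases h : pvSplit xs with
  | nil => exact absurd h (pvSplit_ne_nil xs)
  | cons s r => exact ⟨s, r, rfl⟩

theorem pvDots_fold (seg : List String) (t : Int) :
    seg.foldl (fun t item => if item == "." then t + 1 else t) t = t + pvDots seg := by
  induction seg generalizing t with
  | nil => simp [pvDots]
  | cons x xs ih =>
    have h1 : pvDots (x :: xs) = (if x == "." then (0 : Int) + 1 else 0) + pvDots xs := ih _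
    rw [List.foldl_cons, ih, h1]
    split_ifs <;> omega

theorem pvNonDot_fold (row : List String) (t : Int) :
    row.foldl (fun t item => if item != "." then t + 1 else t) t = t + pvNonDot row := by
  induction row generalizing t with
  | nil => simp [pvNonDot]
  | cons x xs ih =>
    have h1 : pvNonDot (x :: xs) = (if x != "." then (0 : Int) + 1 else 0) + pvNonDot xs := ih _
    rw [List.foldl_cons, ih, h1]
    split_ifs <;> omega

theorem pvNonDot_cons (x : String) (xs : List String) :
    pvNonDot (x :: xs) = (if x != "." then 1 else 0) + pvNonDot xs :=
  (pvNonDot_fold xs (if x != "." then (0 : Int) + 1 else 0)).trans (by split_ifs <;> omega)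

theorem pvDots_cons (x : String) (xs : List String) :
    pvDots (x :: xs) = (if x == "." then 1 else 0) + pvDots xs :=
  (pvDots_fold xs (if x == "." then (0 : Int) + 1 else 0)).trans (by split_ifs <;> omega)

/-- A's inner fold, characterised via segments. -/
theorem pvA_row (xs : List String) (v : Int) :
    (xs.foldl (fun (st : Bool × Int) item =>
        let ins := if item == "|" || item == "L" || item == "J" then !st.1 else st.1
        (ins, if (item == "." && ins) || item != "." then st.2 + 1 else st.2))
      (false, v)).2 = v + pvNonDot xs + pvDotsAt false (pvSplit xs) := by
  suffices h : ∀ (inside : Bool) (v : Int),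
      (xs.foldl (fun (st : Bool × Int) item =>
        let ins := if item == "|" || item == "L" || item == "J" then !st.1 else st.1
        (ins, if (item == "." && ins) || item != "." then st.2 + 1 else st.2))
      (inside, v)).2 = v + pvNonDot xs + pvDotsAt inside (pvSplit xs) by
    exact h false v
  induction xs with
  | nil => intro inside v; simp [pvNonDot, pvDotsAt, pvSplit, pvDots]
  | cons x xs ih =>
    intro inside v
    rw [List.foldl_cons]
    by_cases hx : pvToggle x
    · have hx' : (x == "|" || x == "L" || x == "J") = true := by simpa [pvToggle] using hx
      have hxd : (x != ".") = true := by
        rcases (by simpa [pvToggle] using hx : (x = "|" ∨ x = "L") ∨ x = "J") with (h | h) | h <;>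
          simp [h]
      simp only [hx', if_true, hxd, Bool.or_true, if_true]
      rw [ih]
      simp only [pvSplit, hx, if_true, pvDotsAt, pvNonDot_cons, hxd, if_true]
      have : pvDots [] = 0 := rfl
      cases inside <;> simp [this] <;> omega
    · have hx' : (x == "|" || x == "L" || x == "J") = false := by simpa [pvToggle] using hx
      simp only [hx', Bool.false_eq_true, if_false]
      rw [ih]
      obtain ⟨s, r, hsr⟩ := pvSplit_cons_exists xs
      have hsp : pvSplit (x :: xs) = (x :: s) :: r := by
        simp only [pvSplit, hx, Bool.false_eq_true, if_false, hsr]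
      rw [hsp, hsr]
      simp only [pvDotsAt, pvNonDot_cons, pvDots_cons]
      by_cases hd : x = "." <;> cases inside <;> simp [hd] <;> omega

/-- Prepend `cur` to the head segment. -/
def pvPreH (cur : List String) : List (List String) → List (List String)
  | s :: r => (cur ++ s) :: r
  | [] => [cur]

theorem pvB_split (xs : List String) (segs : List (List String)) (cur : List String) :
    (xs.foldl (fun (st : List (List String) × List String) item =>
        if pvToggle item then (st.1 ++ [st.2], []) else (st.1, st.2 ++ [item]))
      (segs, cur)).1 ++
      [(xs.foldl (fun (st : List (List String) × List String) item =>
        if pvToggle item then (st.1 ++ [st.2], []) else (st.1, st.2 ++ [item]))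
      (segs, cur)).2] = segs ++ pvPreH cur (pvSplit xs) := by
  induction xs generalizing segs cur with
  | nil => simp [pvSplit, pvPreH]
  | cons x xs ih =>
    by_cases hx : pvToggle x
    · simp only [List.foldl_cons, hx, if_pos, pvSplit]
      rw [ih]
      obtain ⟨s, r, hsr⟩ := pvSplit_cons_exists xs
      simp [hsr, pvPreH]
    · simp only [List.foldl_cons, hx, if_neg, Bool.false_eq_true, not_false_eq_true, pvSplit]
      rw [ih]
      obtain ⟨s, r, hsr⟩ := pvSplit_cons_exists xs
      simp [hsr, pvPreH]

theorem pvMod_two (n : ℕ) : (PySem.Int.mod (n : Int) 2 == 1) = decide (n % 2 = 1) := by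
  rw [PySem.Int.mod_eq_emod_of_pos (by norm_num)]
  rcases Nat.mod_two_eq_zero_or_one n with h | h
  · have h2 : (n : Int) % 2 = 0 := by omega
    simp [h2, h]
  · have h2 : (n : Int) % 2 = 1 := by omega
    simp [h2, h]

theorem pvB_enum (segs : List (List String)) (n : ℕ) (t : Int) :
    (PySem.List.enumerate segs (n : Int)).foldl (fun t ks =>
      if PySem.Int.mod ks.1 2 == 1 then
        ks.2.foldl (fun t item => if item == "." then t + 1 else t) t
      else t) t = t + pvDotsAt (decide (n % 2 = 1)) segs := by
  induction segs generalizing n t with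
  | nil => simp [PySem.List.enumerate_nil, pvDotsAt]
  | cons s r ih =>
    rw [PySem.List.enumerate_cons, List.foldl_cons]
    have hc : ((n : Int) + 1) = ((n + 1 : ℕ) : Int) := by push_cast; ring
    rw [hc, ih]
    simp only [pvDotsAt, pvMod_two]
    have hpar : (decide ((n + 1) % 2 = 1)) = !(decide (n % 2 = 1)) := by
      rcases Nat.mod_two_eq_zero_or_one n with h | h <;> simp [Nat.add_mod, h]
    rw [hpar]
    by_cases h : n % 2 = 1
    · simp only [h, decide_true, if_true, Bool.not_true, if_true]
      rw [pvDots_fold]; ring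
    · simp only [h, decide_false, Bool.false_eq_true, if_false, Bool.not_false]
      ring

theorem pvB_enum0 (segs : List (List String)) (t : Int) :
    (PySem.List.enumerate segs 0).foldl (fun t ks =>
      if PySem.Int.mod ks.1 2 == 1 then
        ks.2.foldl (fun t item => if item == "." then t + 1 else t) t
      else t) t = t + pvDotsAt false segs := by
  simpa using pvB_enum segs 0 t

theorem pv_row_eq (row : List String) (v : Int) :
    (row.foldl (fun (st : Bool × Int) item =>
        let ins := if item == "|" || item == "L" || item == "J" then !st.1 else st.1
        (ins, if (item == "." && ins) || item != "." then st.2 + 1 else st.2))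
      (false, v)).2 =
    (let p := row.foldl (fun (st : List (List String) × List String) item =>
        if pvToggle item then (st.1 ++ [st.2], []) else (st.1, st.2 ++ [item])) ([], [])
     let segs := p.1 ++ [p.2]
     let t := row.foldl (fun t item => if item != "." then t + 1 else t) v
     (PySem.List.enumerate segs 0).foldl (fun t ks =>
       if PySem.Int.mod ks.1 2 == 1 then
         ks.2.foldl (fun t item => if item == "." then t + 1 else t) t
       else t) t) := by
  simp only
  have hsegs := pvB_split row [] []
  simp only [List.nil_append] at hsegs
  rw [pvA_row, pvNonDot_fold, pvB_enum0, hsegs]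
  obtain ⟨s, r, hsr⟩ := pvSplit_cons_exists row
  simp [hsr, pvPreH]

theorem pv_main (loop : List (List String)) :
    calculate_volume loop = calculate_volume_alt loop := by
  unfold calculate_volume calculate_volume_alt
  induction loop using List.reverseRecOn with
  | nil => rfl
  | append_singleton rows row ih =>
    rw [List.foldl_append, List.foldl_append, List.foldl_cons, List.foldl_nil,
      List.foldl_cons, List.foldl_nil, ih, pv_row_eq]

-- ===== VERDICT (by name: the statement is the Claim_ definition above) =====
theorem calculate_volume_spec : Claim_equal_calculate_volume :=
  fun loop _ => pv_main loop
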